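-- pv_equiv track=rewrite | github.com/Samaun-Islam/Rubiks_Twist_Encryption | python rubik_cipher.py | rubik_decrypt
-- ===== SOURCE A (Python) =====
-- def rubik_decrypt(ciphertext, moves):
--     blocks = [ciphertext[i:i+9] for i in range(0, len(ciphertext), 9)]
--     result = ""
--     for block in blocks:
--         cube = [list(block[i:i+3]) for i in range(0, 9, 3)]
--         for move in reversed(moves):
--             if move == 'R':
--                 cube[0][2], cube[1][2], cube[2][2] = cube[1][2], cube[2][2], cube[0][2]
--             elif move == 'L':
--                 cube[0][0], cube[1][0], cube[2][0] = cube[2][0], cube[0][0], cube[1][0]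
--             elif move == 'U':
--                 cube[0][0], cube[0][1], cube[0][2] = cube[0][1], cube[0][2], cube[0][0]
--             elif move == 'D':
--                 cube[2][0], cube[2][1], cube[2][2] = cube[2][2], cube[2][0], cube[2][1]
--         result += ''.join([''.join(row) for row in cube])
--     return result.rstrip('X')
-- ===== SOURCE B (Python) =====
-- # B: compose the reversed moves into a single 9-position source permutation once,
-- # then apply it to each block (O(len(moves) + len(ciphertext)) instead of per-block replay).
--
-- # SRC[m][target] = source position: after move m, new[target] = old[source].
-- SRC = {
--     'R': {2: 5, 5: 8, 8: 2},
--     'L': {0: 6, 3: 0, 6: 3},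
--     'U': {0: 1, 1: 2, 2: 0},
--     'D': {6: 8, 7: 6, 8: 7},
-- }
--
-- def rubik_decrypt(ciphertext, moves):
--     perm = list(range(9))
--     for m in reversed(moves):
--         if m in SRC:
--             s = SRC[m]
--             perm = [perm[s.get(p, p)] for p in range(9)]
--     out = []
--     for i in range(0, len(ciphertext), 9):
--         block = ciphertext[i:i+9]
--         out.append(''.join(block[perm[p]] for p in range(len(block))))
--     return ''.join(out).rstrip('X')
-- ===== Notes on version B (the rewrite author's own statement) =====
-- stated objective: faster
-- what changed: Instead of replaying every reversed move on a 3x3 cube for each 9-char block, B composes the reversed moves into a single 9-position source permutation once and applies that permutation to each block.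
import Mathlib
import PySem

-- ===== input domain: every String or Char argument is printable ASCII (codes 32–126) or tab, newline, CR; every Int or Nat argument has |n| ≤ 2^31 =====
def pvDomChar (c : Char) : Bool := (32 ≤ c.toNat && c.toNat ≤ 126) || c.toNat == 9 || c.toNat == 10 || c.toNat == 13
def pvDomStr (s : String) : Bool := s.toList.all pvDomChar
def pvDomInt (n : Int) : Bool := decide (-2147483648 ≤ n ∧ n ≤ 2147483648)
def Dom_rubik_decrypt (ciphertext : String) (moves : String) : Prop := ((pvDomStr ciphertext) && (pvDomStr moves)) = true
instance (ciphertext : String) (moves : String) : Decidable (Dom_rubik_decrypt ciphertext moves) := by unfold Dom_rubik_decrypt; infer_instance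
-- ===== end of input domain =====

-- B composes the reversed moves into ONE 9-position permutation and applies it per block,
-- instead of A's per-block replay of every move on a 3x3 cube.

-- shared hand port of str.rstrip('X'): drop trailing 'X' characters (exact)
def pvRstripX (s : List Char) : List Char := (s.reverse.dropWhile (· == 'X')).reverse

-- ===== PORT A =====
def pvGetC (cube : List (List Char)) (r c : Nat) : Char := (cube.getD r []).getD c ' '
def pvSetC (cube : List (List Char)) (r c : Nat) (v : Char) : List (List Char) :=
  cube.set r ((cube.getD r []).set c v)

-- one iteration of A's `for move in reversed(moves)` body: reads first (RHS tuple), then writes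
def pvMoveA (cube : List (List Char)) (move : Char) : List (List Char) :=
  if move = 'R' then
    let v0 := pvGetC cube 1 2; let v1 := pvGetC cube 2 2; let v2 := pvGetC cube 0 2
    pvSetC (pvSetC (pvSetC cube 0 2 v0) 1 2 v1) 2 2 v2
  else if move = 'L' then
    let v0 := pvGetC cube 2 0; let v1 := pvGetC cube 0 0; let v2 := pvGetC cube 1 0
    pvSetC (pvSetC (pvSetC cube 0 0 v0) 1 0 v1) 2 0 v2
  else if move = 'U' then
    let v0 := pvGetC cube 0 1; let v1 := pvGetC cube 0 2; let v2 := pvGetC cube 0 0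
    pvSetC (pvSetC (pvSetC cube 0 0 v0) 0 1 v1) 0 2 v2
  else if move = 'D' then
    let v0 := pvGetC cube 2 2; let v1 := pvGetC cube 2 0; let v2 := pvGetC cube 2 1
    pvSetC (pvSetC (pvSetC cube 2 0 v0) 2 1 v1) 2 2 v2
  else cube

-- cube = [list(block[i:i+3]) for i in range(0, 9, 3)]
def pvRows (block : List Char) : List (List Char) :=
  (PySem.List.pyRange 0 9 3).map (fun i => PySem.List.slice block (some i) (some (i + 3)))

-- A's loop body for one block
def pvBlockA (block : List Char) (moves : List Char) : List Char :=
  let cube := pvRows block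
  let cube := moves.reverse.foldl pvMoveA cube
  cube.flatten

def rubik_decrypt (ciphertext : String) (moves : String) : String :=
  let cs := ciphertext.toList
  let blocks := (PySem.List.pyRange 0 (cs.length : Int) 9).map
    (fun i => PySem.List.slice cs (some i) (some (i + 9)))
  let result := blocks.foldl (fun acc b => acc ++ pvBlockA b moves.toList) ([] : List Char)
  String.ofList (pvRstripX result)

-- ===== PORT B =====
-- SRC[m].get(p, p): source position feeding target p under move m
def pvSrc (m : Char) (p : Nat) : Nat :=
  if m = 'R' then (if p = 2 then 5 else if p = 5 then 8 else if p = 8 then 2 else p)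
  else if m = 'L' then (if p = 0 then 6 else if p = 3 then 0 else if p = 6 then 3 else p)
  else if m = 'U' then (if p = 0 then 1 else if p = 1 then 2 else if p = 2 then 0 else p)
  else if m = 'D' then (if p = 6 then 8 else if p = 7 then 6 else if p = 8 then 7 else p)
  else p

def pvIsMove (m : Char) : Bool := m == 'R' || m == 'L' || m == 'U' || m == 'D'

-- perm = [perm[s.get(p, p)] for p in range(9)] when m in SRC
def pvStep (perm : List Nat) (m : Char) : List Nat :=
  if pvIsMove m then (List.range 9).map (fun p => perm.getD (pvSrc m p) 0) else perm

-- ''.join(block[perm[p]] for p in range(len(block)))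
def pvApply (block : List Char) (perm : List Nat) : List Char :=
  (List.range block.length).map (fun p => block.getD (perm.getD p 0) ' ')

def rubik_decrypt_alt (ciphertext : String) (moves : String) : String :=
  let cs := ciphertext.toList
  let perm := moves.toList.reverse.foldl pvStep (List.range 9)
  let out := (PySem.List.pyRange 0 (cs.length : Int) 9).foldl
    (fun acc i => acc ++ pvApply (PySem.List.slice cs (some i) (some (i + 9))) perm)
    ([] : List Char)
  String.ofList (pvRstripX out)

-- ===== PRECONDITION & SPEC =====
-- Pre_ excludes exactly the inputs on which A raises IndexError: a last block shorter than 9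
-- combined with a move that touches a cube cell the short block does not have.
def Pre_rubik_decrypt (ciphertext : String) (moves : String) : Prop :=
  ciphertext.toList.length % 9 = 0 ∨
    ('R' ∉ moves.toList ∧ 'D' ∉ moves.toList ∧
     (3 ≤ ciphertext.toList.length % 9 ∨ 'U' ∉ moves.toList) ∧
     (7 ≤ ciphertext.toList.length % 9 ∨ 'L' ∉ moves.toList))
instance (ciphertext : String) (moves : String) : Decidable (Pre_rubik_decrypt ciphertext moves) := by
  unfold Pre_rubik_decrypt; infer_instance

def pvWitness_rubik_decrypt : String × String := ("ABCDEFGHI", "RLUD")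

def Spec_rubik_decrypt (ciphertext : String) (moves : String) (out : String) : Prop := out = rubik_decrypt_alt ciphertext moves
instance (ciphertext : String) (moves : String) (out : String) : Decidable (Spec_rubik_decrypt ciphertext moves out) := by unfold Spec_rubik_decrypt; infer_instance

-- ===== CLAIM (what is proved, stated in full; the proofs are below) =====
def Claim_equal_rubik_decrypt : Prop := ∀ (ciphertext : String) (moves : String), Dom_rubik_decrypt ciphertext moves → Pre_rubik_decrypt ciphertext moves → Spec_rubik_decrypt ciphertext moves (rubik_decrypt ciphertext moves)

-- ===== LEMMAS AND PROOFS =====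

-- a move m is applicable to a block of length n (all cube cells it touches exist)
def pvMoveOK (n : Nat) (m : Char) : Prop :=
  (m = 'R' → n = 9) ∧ (m = 'D' → n = 9) ∧ (m = 'U' → 3 ≤ n) ∧ (m = 'L' → 7 ≤ n)

def pvClosed (n : Nat) (perm : List Nat) : Prop := ∀ p, p < n → perm.getD p 0 < n

theorem pv_map_getD_range (x : List Char) (d : Char) :
    (List.range x.length).map (fun p => x.getD p d) = x := by
  apply List.ext_getElem
  · simp
  · intro i h1 h2
    simp [List.getD_eq_getElem?_getD, List.getElem?_eq_getElem h2]

theorem pv_range9_getD (p : Nat) (hp : p < 9) : (List.range 9).getD p 0 = p := by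
  rw [List.getD_eq_getElem?_getD, List.getElem?_eq_getElem (by simpa using hp)]
  simp

theorem pvSrc_lt (n : Nat) (m : Char) (p : Nat) (hok : pvMoveOK n m) (hp : p < n) :
    pvSrc m p < n := by
  obtain ⟨hR, hD, hU, hL⟩ := hok
  unfold pvSrc
  split_ifs <;> simp_all <;> omega

theorem pvStep_length (perm : List Nat) (m : Char) (h : perm.length = 9) :
    (pvStep perm m).length = 9 := by
  unfold pvStep; split <;> simp [h]

theorem pvStep_getD (perm : List Nat) (m : Char) (hm : pvIsMove m = true) (p : Nat)
    (hp : p < 9) : (pvStep perm m).getD p 0 = perm.getD (pvSrc m p) 0 := by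
  unfold pvStep
  rw [if_pos hm]
  exact PySem.List.getD_map_range _ 9 p _ hp

theorem pvClosed_step (n : Nat) (perm : List Nat) (m : Char) (hn : n ≤ 9)
    (hcl : pvClosed n perm) (hok : pvMoveOK n m) : pvClosed n (pvStep perm m) := by
  intro p hp
  by_cases hm : pvIsMove m = true
  · rw [pvStep_getD perm m hm p (lt_of_lt_of_le hp hn)]
    exact hcl _ (pvSrc_lt n m p hok hp)
  · unfold pvStep
    rw [if_neg hm]
    exact hcl p hp

theorem pvApply_length (b : List Char) (perm : List Nat) : (pvApply b perm).length = b.length := by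
  simp [pvApply]

theorem pvApply_getD (b : List Char) (perm : List Nat) (p : Nat) (hp : p < b.length) :
    (pvApply b perm).getD p ' ' = b.getD (perm.getD p 0) ' ' := by
  unfold pvApply
  exact PySem.List.getD_map_range _ _ p _ hp

theorem pvApply_range9 (b : List Char) (hn : b.length ≤ 9) : pvApply b (List.range 9) = b := by
  unfold pvApply
  have h : ∀ p ∈ List.range b.length, b.getD ((List.range 9).getD p 0) ' ' = b.getD p ' ' := by
    intro p hp
    rw [List.mem_range] at hp
    rw [pv_range9_getD p (lt_of_lt_of_le hp hn)]
  rw [List.map_congr_left h, pv_map_getD_range]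

theorem pvClosed_range9 (n : Nat) (hn : n ≤ 9) : pvClosed n (List.range 9) := by
  intro p hp
  rw [pv_range9_getD p (lt_of_lt_of_le hp hn)]
  exact hp

theorem pvRows_eq (x : List Char) :
    pvRows x = [x.take 3, (x.drop 3).take 3, (x.drop 6).take 3] := by
  have h : PySem.List.pyRange 0 9 3 = [0, 3, 6] := by decide
  unfold pvRows
  rw [h]
  simp only [List.map]
  rw [PySem.List.slice_toNat x (by norm_num) (by norm_num),
      PySem.List.slice_toNat x (by norm_num) (by norm_num),
      PySem.List.slice_toNat x (by norm_num) (by norm_num)]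
  simp

theorem pvCore (x : List Char) (m : Char) (hok : pvMoveOK x.length m)
    (hm : pvIsMove m = true) :
    pvMoveA (pvRows x) m
      = pvRows ((List.range x.length).map (fun p => x.getD (pvSrc m p) ' ')) := by
  have hm' : m = 'R' ∨ m = 'L' ∨ m = 'U' ∨ m = 'D' := by
    simp [pvIsMove] at hm; tauto
  obtain ⟨hR, hD, hU, hL⟩ := hok
  rcases hm' with h | h | h | h
  · -- R : full block
    subst h
    have h9 : x.length = 9 := hR rfl
    rcases x with _ | ⟨c0, x⟩; · exfalso; simp at h9
    rcases x with _ | ⟨c1, x⟩; · exfalso; simp at h9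
    rcases x with _ | ⟨c2, x⟩; · exfalso; simp at h9
    rcases x with _ | ⟨c3, x⟩; · exfalso; simp at h9
    rcases x with _ | ⟨c4, x⟩; · exfalso; simp at h9
    rcases x with _ | ⟨c5, x⟩; · exfalso; simp at h9
    rcases x with _ | ⟨c6, x⟩; · exfalso; simp at h9
    rcases x with _ | ⟨c7, x⟩; · exfalso; simp at h9
    rcases x with _ | ⟨c8, x⟩; · exfalso; simp at h9
    have ht : x = [] := by
      simp only [List.length_cons] at h9
      exact List.length_eq_zero_iff.mp (by omega)
    subst ht
    rw [pvRows_eq, pvRows_eq]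
    norm_num [List.range_succ, pvSrc, pvMoveA, pvGetC, pvSetC, List.getD]
  · -- L : needs the first 7 cells
    subst h
    have h7 : 7 ≤ x.length := hL rfl
    rcases x with _ | ⟨c0, x⟩; · exfalso; simp at h7
    rcases x with _ | ⟨c1, x⟩; · exfalso; simp at h7
    rcases x with _ | ⟨c2, x⟩; · exfalso; simp at h7
    rcases x with _ | ⟨c3, x⟩; · exfalso; simp at h7
    rcases x with _ | ⟨c4, x⟩; · exfalso; simp at h7
    rcases x with _ | ⟨c5, x⟩; · exfalso; simp at h7
    rcases x with _ | ⟨c6, x⟩; · exfalso; simp at h7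
    have hlen : (c0 :: c1 :: c2 :: c3 :: c4 :: c5 :: c6 :: x).length = 7 + x.length := by
      simp only [List.length_cons]; omega
    rw [hlen, List.range_add, List.map_append]
    have hcong : ∀ q ∈ List.range x.length,
        ((fun p => (c0 :: c1 :: c2 :: c3 :: c4 :: c5 :: c6 :: x).getD (pvSrc 'L' p) ' ')
          ∘ fun k => 7 + k) q = x.getD q ' ' := by
      intro q _
      simp only [Function.comp_apply]
      have hs : pvSrc 'L' (7 + q) = 7 + q := by
        unfold pvSrc; split_ifs <;> simp_all <;> omega
      simp only [hs]
      have h7q : 7 + q = q + 1 + 1 + 1 + 1 + 1 + 1 + 1 := by omega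
      rw [h7q]
      simp
    rw [List.map_map, List.map_congr_left hcong, pv_map_getD_range]
    rw [pvRows_eq, pvRows_eq]
    norm_num [List.range_succ, pvSrc, pvMoveA, pvGetC, pvSetC, List.getD,
      (show ('L':Char) ≠ 'R' by decide)]
  · -- U : needs the first 3 cells
    subst h
    have h3 : 3 ≤ x.length := hU rfl
    rcases x with _ | ⟨c0, x⟩; · exfalso; simp at h3
    rcases x with _ | ⟨c1, x⟩; · exfalso; simp at h3
    rcases x with _ | ⟨c2, x⟩; · exfalso; simp at h3
    have hlen : (c0 :: c1 :: c2 :: x).length = 3 + x.length := by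
      simp only [List.length_cons]; omega
    rw [hlen, List.range_add, List.map_append]
    have hcong : ∀ q ∈ List.range x.length,
        ((fun p => (c0 :: c1 :: c2 :: x).getD (pvSrc 'U' p) ' ') ∘ fun k => 3 + k) q
          = x.getD q ' ' := by
      intro q _
      simp only [Function.comp_apply]
      have hs : pvSrc 'U' (3 + q) = 3 + q := by
        unfold pvSrc; split_ifs <;> simp_all <;> omega
      simp only [hs]
      have h3q : 3 + q = q + 1 + 1 + 1 := by omega
      rw [h3q]
      simp
    rw [List.map_map, List.map_congr_left hcong, pv_map_getD_range]
    rw [pvRows_eq, pvRows_eq]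
    norm_num [List.range_succ, pvSrc, pvMoveA, pvGetC, pvSetC, List.getD,
      (show ('U':Char) ≠ 'R' by decide), (show ('U':Char) ≠ 'L' by decide)]
  · -- D : full block
    subst h
    have h9 : x.length = 9 := hD rfl
    rcases x with _ | ⟨c0, x⟩; · exfalso; simp at h9
    rcases x with _ | ⟨c1, x⟩; · exfalso; simp at h9
    rcases x with _ | ⟨c2, x⟩; · exfalso; simp at h9
    rcases x with _ | ⟨c3, x⟩; · exfalso; simp at h9
    rcases x with _ | ⟨c4, x⟩; · exfalso; simp at h9
    rcases x with _ | ⟨c5, x⟩; · exfalso; simp at h9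
    rcases x with _ | ⟨c6, x⟩; · exfalso; simp at h9
    rcases x with _ | ⟨c7, x⟩; · exfalso; simp at h9
    rcases x with _ | ⟨c8, x⟩; · exfalso; simp at h9
    have ht : x = [] := by
      simp only [List.length_cons] at h9
      exact List.length_eq_zero_iff.mp (by omega)
    subst ht
    rw [pvRows_eq, pvRows_eq]
    norm_num [List.range_succ, pvSrc, pvMoveA, pvGetC, pvSetC, List.getD,
      (show ('D':Char) ≠ 'R' by decide), (show ('D':Char) ≠ 'L' by decide), (show ('D':Char) ≠ 'U' by decide)]

theorem pvStep_sim (b : List Char) (perm : List Nat) (m : Char) (hn : b.length ≤ 9)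
    (hok : pvMoveOK b.length m) :
    pvMoveA (pvRows (pvApply b perm)) m = pvRows (pvApply b (pvStep perm m)) := by
  by_cases hm : pvIsMove m = true
  · have hx : (pvApply b perm).length = b.length := pvApply_length b perm
    rw [pvCore (pvApply b perm) m (by rw [hx]; exact hok) hm]
    congr 1
    rw [hx]
    conv_rhs => unfold pvApply
    apply List.map_congr_left
    intro p hp
    rw [List.mem_range] at hp
    rw [pvApply_getD b perm (pvSrc m p) (pvSrc_lt b.length m p hok hp),
        pvStep_getD perm m hm p (lt_of_lt_of_le hp hn)]
  · have h1 : ¬ m = 'R' := fun h => by subst h; simp [pvIsMove] at hm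
    have h2 : ¬ m = 'L' := fun h => by subst h; simp [pvIsMove] at hm
    have h3 : ¬ m = 'U' := fun h => by subst h; simp [pvIsMove] at hm
    have h4 : ¬ m = 'D' := fun h => by subst h; simp [pvIsMove] at hm
    unfold pvMoveA pvStep
    rw [if_neg h1, if_neg h2, if_neg h3, if_neg h4, if_neg hm]

theorem pvFold_sim (b : List Char) (hn : b.length ≤ 9) :
    ∀ (L : List Char) (perm : List Nat), (∀ m ∈ L, pvMoveOK b.length m) →
      pvClosed b.length perm → perm.length = 9 →
      L.foldl pvMoveA (pvRows (pvApply b perm)) = pvRows (pvApply b (L.foldl pvStep perm)) := by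
  intro L
  induction L with
  | nil => intro perm _ _ _; rfl
  | cons m L ih =>
    intro perm hok hcl hlen
    simp only [List.foldl_cons]
    rw [pvStep_sim b perm m hn (hok m List.mem_cons_self)]
    exact ih (pvStep perm m) (fun m' h => hok m' (List.mem_cons_of_mem _ h))
      (pvClosed_step b.length perm m hn hcl (hok m List.mem_cons_self)) (pvStep_length perm m hlen)

theorem pvRows_flatten (x : List Char) (hn : x.length ≤ 9) : (pvRows x).flatten = x := by
  rw [pvRows_eq]
  have h9 : x.take 9 = x := List.take_of_length_le hn
  conv_rhs => rw [← h9]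
  rw [show (9 : Nat) = 3 + (3 + 3) from rfl, List.take_add, List.take_add, List.drop_drop]
  simp

theorem pvBlockA_eq (b mv : List Char) (hn : b.length ≤ 9)
    (hok : ∀ m ∈ mv, pvMoveOK b.length m) :
    pvBlockA b mv = pvApply b (mv.reverse.foldl pvStep (List.range 9)) := by
  unfold pvBlockA
  dsimp only
  have h0 : pvRows b = pvRows (pvApply b (List.range 9)) := by rw [pvApply_range9 b hn]
  rw [h0, pvFold_sim b hn mv.reverse _ (fun m h => hok m (List.mem_reverse.mp h))
      (pvClosed_range9 _ hn) (by simp)]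
  exact pvRows_flatten _ (by rw [pvApply_length]; exact hn)

theorem pvBlock_facts (cs : List Char) (i : Int)
    (hi : i ∈ PySem.List.pyRange 0 (cs.length : Int) 9) :
    (PySem.List.slice cs (some i) (some (i + 9))).length ≤ 9 ∧
      ((PySem.List.slice cs (some i) (some (i + 9))).length = 9 ∨
        ((PySem.List.slice cs (some i) (some (i + 9))).length = cs.length % 9 ∧
          cs.length % 9 ≠ 0)) := by
  rw [PySem.List.mem_pyRange_iff_of_pos (by norm_num)] at hi
  obtain ⟨h0, hlt, hdvd⟩ := hi
  rw [PySem.List.slice_toNat cs h0 (by omega)]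
  simp only [List.length_take, List.length_drop]
  omega

theorem pvMoveOK_of_pre (n : Nat) (mvs : List Char) (m : Char) (hm : m ∈ mvs) (len : Nat)
    (hcase : len = 9 ∨ (len = n % 9 ∧ n % 9 ≠ 0))
    (hpre : n % 9 = 0 ∨
      ('R' ∉ mvs ∧ 'D' ∉ mvs ∧ (3 ≤ n % 9 ∨ 'U' ∉ mvs) ∧ (7 ≤ n % 9 ∨ 'L' ∉ mvs))) :
    pvMoveOK len m := by
  rcases hcase with h9 | ⟨hlen, hnz⟩
  · subst h9
    exact ⟨fun _ => rfl, fun _ => rfl, fun _ => by omega, fun _ => by omega⟩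
  · rcases hpre with h0 | ⟨hR, hD, hU, hL⟩
    · exact absurd h0 hnz
    · subst hlen
      refine ⟨fun h => absurd (h ▸ hm) hR, fun h => absurd (h ▸ hm) hD, fun h => ?_, fun h => ?_⟩
      · rcases hU with h3 | hU
        · exact h3
        · exact absurd (h ▸ hm) hU
      · rcases hL with h7 | hL
        · exact h7
        · exact absurd (h ▸ hm) hL

-- ===== VERDICT (by name: the statement is the Claim_ definition above) =====
theorem rubik_decrypt_spec : Claim_equal_rubik_decrypt := by
  intro ciphertext moves _hdom hpre
  unfold Spec_rubik_decrypt rubik_decrypt rubik_decrypt_alt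
  dsimp only
  refine congrArg String.ofList (congrArg pvRstripX ?_)
  rw [List.foldl_map]
  apply PySem.List.foldl_congr_mem
  intro acc i hi
  obtain ⟨hle, hcase⟩ := pvBlock_facts ciphertext.toList i hi
  exact congrArg (acc ++ ·) (pvBlockA_eq _ _ hle
    (fun m hm => pvMoveOK_of_pre ciphertext.toList.length moves.toList m hm _ hcase hpre))
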